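-- pv_equiv track=rewrite | github.com/ginkogrudev/Mindhub | python/solution.py | penguins_distances
-- ===== SOURCE A (Python) =====
-- def penguins_distances(race):
--     p_index = 0
--     wave_cnt = 0
--     dashes_cnt = 0
--     for r in range(len(race)):
--         if race[r] == "P" or race[r] == "p":
--             p_index = race[r]
--         if p_index != 0 and race[r] == "~":
--             wave_cnt += 1
--         if p_index != 0 and race[r] == "-":
--             dashes_cnt += 1
--
--     return dashes_cnt+wave_cnt*2
-- ===== SOURCE B (Python) =====
-- def penguins_distances(race):
--     idx = next((i for i, c in enumerate(race) if c in "Pp"), None)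
--     if idx is None:
--         return 0
--     tail = race[idx:]
--     return tail.count("-") + tail.count("~") * 2
-- ===== Notes on version B (the rewrite author's own statement) =====
-- stated objective: simpler
-- what changed: Replaces A's single interleaved flag-carrying pass (a seen-penguin flag plus two counters updated per character) by a locate-then-count decomposition: find the index of the first penguin character, then count dashes and waves in the tail slice with str.count.
import Mathlib
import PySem

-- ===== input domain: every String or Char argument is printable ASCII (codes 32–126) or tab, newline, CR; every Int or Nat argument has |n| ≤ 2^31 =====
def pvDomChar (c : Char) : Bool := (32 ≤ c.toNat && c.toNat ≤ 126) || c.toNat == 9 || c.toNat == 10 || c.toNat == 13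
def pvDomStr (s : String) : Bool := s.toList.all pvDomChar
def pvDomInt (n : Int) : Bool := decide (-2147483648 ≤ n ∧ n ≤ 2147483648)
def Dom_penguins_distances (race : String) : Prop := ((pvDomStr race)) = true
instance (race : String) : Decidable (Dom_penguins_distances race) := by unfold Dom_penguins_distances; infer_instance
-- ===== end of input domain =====

-- B replaces A's single flag-carrying pass by find-first-penguin then two counts over the tail (simpler decomposition).

-- ===== PORT A =====
-- one loop step of A: set the flag on 'P'/'p', then the two counter updates, in A's branch order
def pdStep (s : Bool × Int × Int) (c : Char) : Bool × Int × Int :=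
  let flag := if c = 'P' ∨ c = 'p' then true else s.1
  let wave := if flag = true ∧ c = '~' then s.2.1 + 1 else s.2.1
  let dash := if flag = true ∧ c = '-' then s.2.2 + 1 else s.2.2
  (flag, wave, dash)

def penguins_distances (race : String) : Int :=
  let s := race.toList.foldl pdStep (false, 0, 0)
  s.2.2 + s.2.1 * 2

-- ===== PORT B =====
def penguins_distances_alt (race : String) : Int :=
  match race.toList.findIdx? (fun c => c = 'P' || c = 'p') with
  | none => 0
  | some i =>
      let tail := race.toList.drop i
      (tail.count '-' : Int) + (tail.count '~' : Int) * 2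

-- ===== PRECONDITION & SPEC =====
def Spec_penguins_distances (race : String) (out : Int) : Prop := out = penguins_distances_alt race
instance (race : String) (out : Int) : Decidable (Spec_penguins_distances race out) := by unfold Spec_penguins_distances; infer_instance

-- ===== CLAIM (what is proved, stated in full; the proofs are below) =====
def Claim_equal_penguins_distances : Prop := ∀ (race : String), Dom_penguins_distances race → Spec_penguins_distances race (penguins_distances race)

-- ===== LEMMAS AND PROOFS =====

-- once the flag is true it stays true and the counters just accumulate char counts
theorem pdLoop_true (l : List Char) (w d : Int) :
    l.foldl pdStep (true, w, d) = (true, w + l.count '~', d + l.count '-') := by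
  induction l generalizing w d with
  | nil => simp
  | cons c t ih =>
      simp only [List.foldl_cons, pdStep, List.count_cons]
      split_ifs <;> simp_all [ih] <;> push_cast <;> ring

-- with the flag still false, the loop result matches B's find-then-count value plus the carried counters
theorem pdLoop_false (l : List Char) (w d : Int) :
    (let s := l.foldl pdStep (false, w, d); s.2.2 + s.2.1 * 2) =
      d + w * 2 + (match l.findIdx? (fun c => c = 'P' || c = 'p') with
        | none => 0
        | some i => ((l.drop i).count '-' : Int) + ((l.drop i).count '~' : Int) * 2) := by
  induction l generalizing w d with
  | nil => simp
  | cons c t ih =>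
      by_cases hc : c = 'P' ∨ c = 'p'
      · have hb : (fun c => c = 'P' || c = 'p') c = true := by
          rcases hc with h | h <;> simp [h]
        have hP : c ≠ '~' ∧ c ≠ '-' := by rcases hc with h | h <;> simp [h]
        simp only [List.findIdx?_cons, hb, if_pos, List.foldl_cons, pdStep, hc]
        simp only [if_true, hP.1, hP.2, and_false, if_false, List.drop_zero]
        rw [pdLoop_true]
        simp [List.count_cons, hP.1, hP.2]
        ring
      · have hb : (fun c => c = 'P' || c = 'p') c = false := by
          simp only [not_or] at hc; simp [hc.1, hc.2]
        simp only [List.findIdx?_cons, hb, List.foldl_cons]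
        have hstep : pdStep (false, w, d) c = (false, w, d) := by simp [pdStep, hc]
        rw [hstep, ih]
        cases h : t.findIdx? (fun c => c = 'P' || c = 'p') <;> simp [h]

-- ===== VERDICT (by name: the statement is the Claim_ definition above) =====
theorem penguins_distances_spec : Claim_equal_penguins_distances := by
  intro race _
  unfold Spec_penguins_distances penguins_distances penguins_distances_alt
  have := pdLoop_false race.toList 0 0
  simp only at this ⊢
  rw [this]
  cases h : race.toList.findIdx? (fun c => c = 'P' || c = 'p') <;> simp [h]
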